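-- pv_equiv track=rewrite | github.com/owy1/code-katas | src/string_pyramid.py | count_all_characters_of_the_pyramid
-- ===== SOURCE A (Python) =====
-- def count_all_characters_of_the_pyramid(characters):
--     """Return all characters of pyramid."""
--     if not characters: return -1
--     n = len(characters)
--     tot = 0
--     for i in range(n, 0, -1):
--         tot += (2 * n - 1) ** 2
--         n -= 1
--     return tot
-- ===== SOURCE B (Python) =====
-- def count_all_characters_of_the_pyramid(characters):
--     """Return all characters of pyramid."""
--     if not characters:
--         return -1
--     n = len(characters)
--     return n * (2 * n - 1) * (2 * n + 1) // 3
-- ===== Notes on version B (the rewrite author's own statement) =====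
-- stated objective: faster
-- what changed: Replaced the O(n) loop summing odd squares (2k-1)^2 for k=n..1 by the closed form n*(2n-1)*(2n+1)//3, keeping the empty-string -1 case.
import Mathlib
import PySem

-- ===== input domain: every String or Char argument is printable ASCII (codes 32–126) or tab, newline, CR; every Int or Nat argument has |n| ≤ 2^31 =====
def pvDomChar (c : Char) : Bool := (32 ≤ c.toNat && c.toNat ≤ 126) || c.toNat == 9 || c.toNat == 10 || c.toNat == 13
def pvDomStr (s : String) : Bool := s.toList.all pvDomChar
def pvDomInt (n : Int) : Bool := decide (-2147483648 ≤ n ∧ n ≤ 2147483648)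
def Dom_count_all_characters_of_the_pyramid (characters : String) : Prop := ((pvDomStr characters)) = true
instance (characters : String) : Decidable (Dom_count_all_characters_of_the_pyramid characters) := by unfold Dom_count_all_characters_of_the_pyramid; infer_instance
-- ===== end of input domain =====

-- B replaces A's O(n) loop over odd squares by the closed form n*(2n-1)*(2n+1)//3 (same -1 on the empty string).

-- ===== PORT A =====
-- loop body of A: tot += (2*n-1)**2; n -= 1  (state = (n, tot); the range element is unused)
def pvStep (st : Int × Int) (_ : Int) : Int × Int := (st.1 - 1, st.2 + (2 * st.1 - 1) ^ 2)

def count_all_characters_of_the_pyramid (characters : String) : Int :=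
  if PySem.Str.len characters = 0 then -1
  else
    ((PySem.List.pyRange (PySem.Str.len characters) 0 (-1)).foldl pvStep
      (PySem.Str.len characters, 0)).2

-- ===== PORT B =====
def count_all_characters_of_the_pyramid_alt (characters : String) : Int :=
  if PySem.Str.len characters = 0 then -1
  else
    PySem.Int.floordiv
      (PySem.Str.len characters * (2 * PySem.Str.len characters - 1)
        * (2 * PySem.Str.len characters + 1)) 3

-- ===== PRECONDITION & SPEC =====
def Spec_count_all_characters_of_the_pyramid (characters : String) (out : Int) : Prop := out = count_all_characters_of_the_pyramid_alt characters
instance (characters : String) (out : Int) : Decidable (Spec_count_all_characters_of_the_pyramid characters out) := by unfold Spec_count_all_characters_of_the_pyramid; infer_instance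

-- ===== CLAIM (what is proved, stated in full; the proofs are below) =====
def Claim_equal_count_all_characters_of_the_pyramid : Prop := ∀ (characters : String), Dom_count_all_characters_of_the_pyramid characters → Spec_count_all_characters_of_the_pyramid characters (count_all_characters_of_the_pyramid characters)

-- ===== LEMMAS AND PROOFS =====

-- 3 × (accumulated sum) telescopes through P n = n(2n-1)(2n+1)
lemma pvFoldl_snd (l : List Int) : ∀ (n t : Int),
    3 * (l.foldl pvStep (n, t)).2 =
      3 * t + n * (2 * n - 1) * (2 * n + 1)
        - (n - l.length) * (2 * (n - l.length) - 1) * (2 * (n - l.length) + 1) := by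
  induction l with
  | nil => intro n t; simp
  | cons x l ih =>
    intro n t
    have h := ih (n - 1) (t + (2 * n - 1) ^ 2)
    simp only [List.foldl_cons, pvStep, List.length_cons] at h ⊢
    push_cast at h ⊢
    linarith [h]

-- ===== VERDICT (by name: the statement is the Claim_ definition above) =====
theorem count_all_characters_of_the_pyramid_spec : Claim_equal_count_all_characters_of_the_pyramid := by
  intro characters _
  unfold Spec_count_all_characters_of_the_pyramid
  unfold count_all_characters_of_the_pyramid count_all_characters_of_the_pyramid_alt
  by_cases h : PySem.Str.len characters = 0
  · rw [if_pos h, if_pos h]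
  · rw [if_neg h, if_neg h]
    set n : Int := PySem.Str.len characters with hn
    have hn0 : 0 ≤ n := by rw [hn, PySem.Str.len_eq]; positivity
    have hlen : ((PySem.List.pyRange n 0 (-1)).length : Int) = n := by
      rw [PySem.List.length_pyRange_neg_one]
      omega
    have key := pvFoldl_snd (PySem.List.pyRange n 0 (-1)) n 0
    rw [hlen] at key
    rw [eq_comm, PySem.Int.floordiv_eq_iff_of_pos (by norm_num)]
    constructor <;> nlinarith [key]
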